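-- pv_equiv track=rewrite | github.com/cuijinyu/new-api | scripts/reconcile/db_checks.py | _group_retry_clusters
-- ===== SOURCE A (Python) =====
-- def _group_retry_clusters(rows, retry_window_sec):
--     clusters = []
--     if not rows:
--         return clusters
--
--     current = [rows[0]]
--     for row in rows[1:]:
--         prev = current[-1]
--         if row["created_at"] - prev["created_at"] <= retry_window_sec:
--             current.append(row)
--         else:
--             if len(current) >= 2:
--                 clusters.append(current)
--             current = [row]
--     if len(current) >= 2:
--         clusters.append(current)
--     return clusters
-- ===== SOURCE B (Python) =====
-- def _group_retry_clusters(rows, retry_window_sec):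
--     if not rows:
--         return []
--     # pass 1: run-length encode the consecutive segments (strict gap > window breaks)
--     lengths = [1]
--     for prev, row in zip(rows, rows[1:]):
--         if row["created_at"] - prev["created_at"] <= retry_window_sec:
--             lengths[-1] += 1
--         else:
--             lengths.append(1)
--     # pass 2: slice rows by the run lengths, keeping only runs of at least 2
--     clusters = []
--     pos = 0
--     for L in lengths:
--         if L >= 2:
--             clusters.append(rows[pos:pos + L])
--         pos += L
--     return clusters
-- ===== Notes on version B (the rewrite author's own statement) =====
-- stated objective: alternative
-- what changed: A accumulates the current segment and flushes qualifying clusters inside one loop; B makes two passes: it run-length encodes the consecutive segments (gap <= window) and then slices rows by those lengths, keeping only runs of length >= 2.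
import Mathlib
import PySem

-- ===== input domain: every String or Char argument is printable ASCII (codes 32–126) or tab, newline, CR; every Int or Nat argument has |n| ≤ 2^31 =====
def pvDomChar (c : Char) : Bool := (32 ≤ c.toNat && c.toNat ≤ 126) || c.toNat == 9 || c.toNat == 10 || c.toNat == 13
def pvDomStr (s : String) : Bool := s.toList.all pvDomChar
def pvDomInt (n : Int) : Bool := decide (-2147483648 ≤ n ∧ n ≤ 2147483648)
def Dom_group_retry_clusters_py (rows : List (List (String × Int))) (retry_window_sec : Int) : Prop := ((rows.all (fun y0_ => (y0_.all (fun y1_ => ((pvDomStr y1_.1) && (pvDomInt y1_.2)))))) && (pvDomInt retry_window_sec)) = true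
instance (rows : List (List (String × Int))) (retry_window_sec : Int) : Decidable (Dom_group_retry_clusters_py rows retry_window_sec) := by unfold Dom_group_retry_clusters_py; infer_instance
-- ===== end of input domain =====

-- B replaces A's single accumulate-and-flush loop by two passes: run-length encode the
-- consecutive segments, then slice rows by those lengths keeping only runs of length ≥ 2 (objective: alternative decomposition).

-- shared dict access row["created_at"] (exact under Pre_, where every row carries the key)
def pvCreated (r : List (String × Int)) : Int := (PySem.Dict.ofList r).getD "created_at" 0

-- ===== PORT A =====
-- loop body of A's for-loop
def pvStepA (w : Int) (st : List (List (List (String × Int))) × List (List (String × Int))) (row : List (String × Int)) : List (List (List (String × Int))) × List (List (String × Int)) :=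
  let prev := PySem.List.pyGetD st.2 (-1) []
  if pvCreated row - pvCreated prev ≤ w then (st.1, st.2 ++ [row])
  else (if 2 ≤ PySem.List.len st.2 then st.1 ++ [st.2] else st.1, [row])

-- A's trailing flush of the last current segment
def pvFinishA (st : List (List (List (String × Int))) × List (List (String × Int))) : List (List (List (String × Int))) :=
  if 2 ≤ PySem.List.len st.2 then st.1 ++ [st.2] else st.1

def group_retry_clusters_py (rows : List (List (String × Int))) (retry_window_sec : Int) : List (List (List (String × Int))) :=
  match rows with
  | [] => []
  | r0 :: rest => pvFinishA (rest.foldl (pvStepA retry_window_sec) ([], [r0]))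

-- ===== PORT B =====
-- B pass 1 loop body: extend the last run length or start a new run
def pvStepLen (w : Int) (Ls : List Int) (pr : List (String × Int) × List (String × Int)) : List Int :=
  if pvCreated pr.2 - pvCreated pr.1 ≤ w then
    PySem.List.pySetD Ls (-1) (PySem.List.pyGetD Ls (-1) 0 + 1)
  else Ls ++ [1]

-- B pass 2 loop body: slice out a run of length L starting at the running position
def pvStepSlice (rows : List (List (String × Int))) (st : List (List (List (String × Int))) × Int) (L : Int) : List (List (List (String × Int))) × Int :=
  (if 2 ≤ L then st.1 ++ [PySem.List.slice rows (some st.2) (some (st.2 + L))] else st.1, st.2 + L)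

def group_retry_clusters_py_alt (rows : List (List (String × Int))) (retry_window_sec : Int) : List (List (List (String × Int))) :=
  if rows.isEmpty then []
  else
    let lengths := (rows.zip (PySem.List.slice rows (some 1) none)).foldl (pvStepLen retry_window_sec) [1]
    (lengths.foldl (pvStepSlice rows) ([], 0)).1

-- ===== PRECONDITION & SPEC =====
-- Pre_ excludes exactly the inputs where Python A raises KeyError: two or more rows and some row missing "created_at"
def Pre_group_retry_clusters_py (rows : List (List (String × Int))) (retry_window_sec : Int) : Prop :=
  PySem.List.len rows ≤ 1 ∨ rows.all (fun r => (PySem.Dict.ofList r).contains "created_at") = true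
instance (rows : List (List (String × Int))) (retry_window_sec : Int) : Decidable (Pre_group_retry_clusters_py rows retry_window_sec) := by unfold Pre_group_retry_clusters_py; infer_instance

def pvWitness_group_retry_clusters_py : (List (List (String × Int))) × Int :=
  ([[("created_at", 0)], [("created_at", 5)], [("created_at", 100)], [("created_at", 103)]], 10)

def Spec_group_retry_clusters_py (rows : List (List (String × Int))) (retry_window_sec : Int) (out : List (List (List (String × Int)))) : Prop := out = group_retry_clusters_py_alt rows retry_window_sec
instance (rows : List (List (String × Int))) (retry_window_sec : Int) (out : List (List (List (String × Int)))) : Decidable (Spec_group_retry_clusters_py rows retry_window_sec out) := by unfold Spec_group_retry_clusters_py; infer_instance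

-- ===== CLAIM (what is proved, stated in full; the proofs are below) =====
def Claim_equal_group_retry_clusters_py : Prop := ∀ (rows : List (List (String × Int))) (retry_window_sec : Int), Dom_group_retry_clusters_py rows retry_window_sec → Pre_group_retry_clusters_py rows retry_window_sec → Spec_group_retry_clusters_py rows retry_window_sec (group_retry_clusters_py rows retry_window_sec)

-- ===== LEMMAS AND PROOFS =====

-- common abstraction: the clusters-of-consecutive-runs recursion both ports compute
def pvRun (w : Int) (cur : List (List (String × Int))) (last : List (String × Int)) : List (List (String × Int)) → List (List (List (String × Int)))
  | [] => if 2 ≤ (cur.length : Int) then [cur] else []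
  | r :: rest =>
      if pvCreated r - pvCreated last ≤ w then pvRun w (cur ++ [r]) r rest
      else (if 2 ≤ (cur.length : Int) then [cur] else []) ++ pvRun w [r] r rest

-- the run lengths B's first pass computes
def pvLens (w : Int) (cur : List (List (String × Int))) (last : List (String × Int)) : List (List (String × Int)) → List Int
  | [] => [(cur.length : Int)]
  | r :: rest =>
      if pvCreated r - pvCreated last ≤ w then pvLens w (cur ++ [r]) r rest
      else (cur.length : Int) :: pvLens w [r] r rest

-- A's fold with a nonempty current segment computes pvRun
lemma pvLemA (w : Int) (xs : List (List (String × Int))) :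
    ∀ (clusters : List (List (List (String × Int)))) (cur : List (List (String × Int))) (last : List (String × Int)),
      cur.getLast? = some last →
      pvFinishA (xs.foldl (pvStepA w) (clusters, cur)) = clusters ++ pvRun w cur last xs := by
  induction xs with
  | nil =>
    intro clusters cur last _
    simp only [List.foldl_nil, pvFinishA, pvRun, PySem.List.len_eq]
    split_ifs with h
    · rfl
    · simp
  | cons r rest ih =>
    intro clusters cur last hl
    have hne : cur ≠ [] := by
      intro h; subst h; simp at hl
    have hprev : PySem.List.pyGetD cur (-1) ([] : List (String × Int)) = last := by
      rw [PySem.List.pyGetD_neg_one cur ([] : List (String × Int)) hne]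
      have h2 := List.getLast?_eq_getLast (l := cur) hne
      rw [h2] at hl
      exact Option.some_inj.mp hl
    simp only [List.foldl_cons, pvStepA, hprev, pvRun, PySem.List.len_eq]
    split_ifs with hc h2
    · exact ih clusters (cur ++ [r]) r (by simp)
    · rw [ih (clusters ++ [cur]) [r] r (by simp)]
      simp
    · rw [ih clusters [r] r (by simp)]
      simp

-- setting index -1 of a list ending in [c]
lemma pvSetLast (Ls : List Int) (c v : Int) :
    PySem.List.pySetD (Ls ++ [c]) (-1) v = Ls ++ [v] := by
  simp only [PySem.List.pySetD, PySem.List.pySet?, PySem.List.pyIdx?]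
  rw [if_neg (by norm_num), if_pos (by simp only [List.length_append, List.length_cons, List.length_nil]; omega)]
  simp only [Option.map_some, Option.getD_some]
  have h : (Ls ++ [c]).length - ((-(-1 : Int)).toNat) = Ls.length := by simp
  rw [h, List.set_append_right _ _ (le_refl _)]
  simp

-- B's first pass computes pvLens
lemma pvLemB1 (w : Int) (rest : List (List (String × Int))) :
    ∀ (Ls : List Int) (cur : List (List (String × Int))) (last : List (String × Int)),
      ((last :: rest).zip rest).foldl (pvStepLen w) (Ls ++ [(cur.length : Int)]) = Ls ++ pvLens w cur last rest := by
  induction rest with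
  | nil => intro Ls cur last; simp [pvLens]
  | cons r rest' ih =>
    intro Ls cur last
    simp only [List.zip_cons_cons, List.foldl_cons, pvStepLen, pvLens]
    split_ifs with hc
    · rw [PySem.List.pyGetD_neg_one_append_singleton, pvSetLast]
      have h : (cur.length : Int) + 1 = (((cur ++ [r]).length : Int)) := by
        simp [List.length_append]
      rw [h, ih Ls (cur ++ [r]) r]
    · have h : Ls ++ [(cur.length : Int)] ++ [(1 : Int)]
          = (Ls ++ [(cur.length : Int)]) ++ [(([r] : List (List (String × Int))).length : Int)] := by
        simp
      rw [h, ih (Ls ++ [(cur.length : Int)]) [r] r]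
      simp

-- the middle segment is recovered by its slice
lemma pvSliceMid (pre mid suf : List (List (String × Int))) :
    PySem.List.slice (pre ++ mid ++ suf) (some (pre.length : Int)) (some ((pre.length : Int) + (mid.length : Int))) = mid := by
  rw [PySem.List.slice_natCast_add]
  rw [List.append_assoc, List.drop_left, List.take_left]

-- B's second pass over pvLens computes pvRun
lemma pvLemB2 (w : Int) (rest : List (List (String × Int))) :
    ∀ (pre cur : List (List (String × Int))) (last : List (String × Int)) (clusters : List (List (List (String × Int)))),
      ((pvLens w cur last rest).foldl (pvStepSlice (pre ++ cur ++ rest)) (clusters, (pre.length : Int))).1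
        = clusters ++ pvRun w cur last rest := by
  induction rest with
  | nil =>
    intro pre cur last clusters
    simp only [pvLens, List.foldl_cons, List.foldl_nil, pvStepSlice, pvRun]
    split_ifs with hc
    · rw [pvSliceMid pre cur []]
    · simp
  | cons r rest' ih =>
    intro pre cur last clusters
    simp only [pvLens, pvRun]
    have hsl : PySem.List.slice (pre ++ cur ++ (r :: rest')) (some (pre.length : Int))
        (some ((pre.length : Int) + (cur.length : Int))) = cur := by
      have e2 : pre ++ cur ++ (r :: rest') = pre ++ cur ++ ([r] ++ rest') := by simp
      rw [e2]
      exact pvSliceMid pre cur ([r] ++ rest')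
    have e : pre ++ cur ++ (r :: rest') = (pre ++ cur) ++ [r] ++ rest' := by simp
    have epos : (pre.length : Int) + (cur.length : Int) = (((pre ++ cur).length : Int)) := by
      simp [List.length_append]
    split_ifs with hc h2
    · have e1 : pre ++ cur ++ (r :: rest') = pre ++ (cur ++ [r]) ++ rest' := by simp
      rw [e1]
      exact ih pre (cur ++ [r]) r clusters
    · simp only [List.foldl_cons, pvStepSlice]
      rw [if_pos h2, hsl, e, epos, ih (pre ++ cur) [r] r (clusters ++ [cur])]
      simp
    · simp only [List.foldl_cons, pvStepSlice]
      rw [if_neg h2, e, epos, ih (pre ++ cur) [r] r clusters]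
      simp

-- ===== VERDICT (by name: the statement is the Claim_ definition above) =====
theorem group_retry_clusters_py_spec : Claim_equal_group_retry_clusters_py := by
  intro rows w _ _
  show group_retry_clusters_py rows w = group_retry_clusters_py_alt rows w
  cases rows with
  | nil => rfl
  | cons r0 rest =>
    have hA : group_retry_clusters_py (r0 :: rest) w = pvRun w [r0] r0 rest := by
      show pvFinishA (rest.foldl (pvStepA w) ([], [r0])) = _
      simpa using pvLemA w rest [] [r0] r0 (by simp)
    have hB : group_retry_clusters_py_alt (r0 :: rest) w = pvRun w [r0] r0 rest := by
      simp only [group_retry_clusters_py_alt, List.isEmpty_cons, Bool.false_eq_true, if_false,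
        PySem.List.slice_from_one, List.tail_cons]
      have h1 : ((r0 :: rest).zip rest).foldl (pvStepLen w) [1] = pvLens w [r0] r0 rest := by
        simpa using pvLemB1 w rest [] [r0] r0
      rw [h1]
      simpa using pvLemB2 w rest [] [r0] r0 []
    rw [hA, hB]
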